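-- pv_equiv track=rewrite | github.com/Stars1233/SpatialVID | utils/get_instruction_enhanced.py | collect_interval_based_votes
-- ===== SOURCE A (Python) =====
-- from math import sqrt
-- from collections import defaultdict, Counter
--
-- def collect_interval_based_votes(all_results, param_combinations):
--     """
--     Vote by time interval: collect all instructions covering (start_frame->end_frame).
--     Handles overlapping segments from different (interval, alpha) pairs.
--     """
--     if not all_results:
--         return {}
--
--     # Get max frame covered by any parameter pair
--     max_frames = 0
--     for index, res in enumerate(all_results):
--         interval = param_combinations[index][0]
--         stride = int(sqrt(interval) + 1)
--         if res:
--             last_start = (len(res)-1) * stride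
--             max_frames = max(max_frames, last_start + interval)
--
--     interval_votes = {}
--     for start in range(max_frames):
--         end = start + 1
--         vote_counter = Counter()
--         # Check all parameter results for coverage of (start->end)
--         for res_index, res in enumerate(all_results):
--             interval, _ = param_combinations[res_index]
--             stride = int(sqrt(interval) + 1)
--             for seg_index, seg in enumerate(res):
--                 seg_start = seg_index * stride
--                 seg_end = seg_start + interval
--                 # Check if segment covers target interval
--                 if seg_start <= start < seg_end and seg_start < end <= seg_end:
--                     for inst in seg:
--                         vote_counter[inst] += 1
--         interval_votes[f"{start}->{end}"] = vote_counter
--     return interval_votes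
-- ===== SOURCE B (Python) =====
-- from math import isqrt
-- from collections import Counter
--
-- def collect_interval_based_votes(all_results, param_combinations):
--     """
--     Single pass: grow a list of per-frame Counters and scatter each segment's
--     instruction votes once into its covered contiguous frame range, instead of
--     a prepass for max_frames followed by re-scanning every segment per frame.
--     """
--     votes = []  # votes[f] is the Counter for the interval f->f+1; grown on demand
--     for index, res in enumerate(all_results):
--         interval = param_combinations[index][0]
--         stride = isqrt(interval) + 1
--         for seg_index, seg in enumerate(res):
--             seg_start = seg_index * stride
--             seg_end = seg_start + interval
--             while len(votes) < seg_end: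
--                 votes.append(Counter())
--             for f in range(seg_start, seg_end):
--                 votes[f].update(seg)
--     return {f"{f}->{f + 1}": c for f, c in enumerate(votes)}
-- ===== Notes on version B (the rewrite author's own statement) =====
-- stated objective: alternative
-- what changed: Instead of a prepass computing max_frames and then, for every frame, re-scanning every segment of every result with a coverage test, B makes a single pass over the segments, growing a list of per-frame counters on demand and scattering each segment's votes once into its covered contiguous frame range, then reads the list off in order; on dense coverage the cost is similar, on sparse coverage B skips the per-frame rescans.
import Mathlib
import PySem

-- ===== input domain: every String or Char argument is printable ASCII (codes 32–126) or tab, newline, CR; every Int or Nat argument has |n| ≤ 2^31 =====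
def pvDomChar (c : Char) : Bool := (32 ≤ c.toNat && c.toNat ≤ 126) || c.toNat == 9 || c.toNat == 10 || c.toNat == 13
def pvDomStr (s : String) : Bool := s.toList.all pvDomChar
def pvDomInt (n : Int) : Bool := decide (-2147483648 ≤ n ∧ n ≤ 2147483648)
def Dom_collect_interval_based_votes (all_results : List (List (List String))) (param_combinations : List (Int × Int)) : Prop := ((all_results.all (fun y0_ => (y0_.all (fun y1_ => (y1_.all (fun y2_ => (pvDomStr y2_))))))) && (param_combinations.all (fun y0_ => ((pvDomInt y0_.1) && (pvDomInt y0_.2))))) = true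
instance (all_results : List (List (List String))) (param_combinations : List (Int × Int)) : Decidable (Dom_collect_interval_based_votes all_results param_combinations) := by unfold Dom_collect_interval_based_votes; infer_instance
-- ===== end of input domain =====

-- B replaces A's max_frames prepass + per-frame rescan of all segments by a single pass that
-- grows a list of per-frame counters and scatters each segment's votes once into its frame range.

-- port of Python's int(sqrt(interval) + 1) = isqrt(interval) + 1: exact for 0 ≤ interval ≤ 2^31
-- (all of Dom; a negative interval raises in A and is excluded by Pre_)
def pvStride (interval : Int) : Int := Int.ofNat (Nat.sqrt interval.toNat) + 1

-- ===== PORT A =====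
def collect_interval_based_votes (all_results : List (List (List String))) (param_combinations : List (Int × Int)) : List (String × List (String × Int)) :=
  if all_results = [] then []
  else
    let max_frames : Int :=
      (PySem.List.enumerate all_results).foldl (fun mf p =>
        let interval := (PySem.List.pyGetD param_combinations p.1 (0, 0)).1
        let stride := pvStride interval
        if p.2 ≠ [] then max mf (((p.2.length : Int) - 1) * stride + interval) else mf) 0
    ((PySem.List.pyRange 0 max_frames 1).foldl (fun d start =>
        let end_ := start + 1
        let vote_counter : PySem.Dict String Int :=
          (PySem.List.enumerate all_results).foldl (fun vc rp =>
            let interval := (PySem.List.pyGetD param_combinations rp.1 (0, 0)).1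
            let stride := pvStride interval
            (PySem.List.enumerate rp.2).foldl (fun vc sp =>
              let seg_start := sp.1 * stride
              let seg_end := seg_start + interval
              if (seg_start ≤ start ∧ start < seg_end) ∧ (seg_start < end_ ∧ end_ ≤ seg_end) then
                sp.2.foldl (fun c inst => c.modify inst 0 (· + 1)) vc
              else vc) vc) PySem.Dict.empty
        d.insert (PySem.Int.toStr start ++ "->" ++ PySem.Int.toStr end_) vote_counter)
      (PySem.Dict.empty : PySem.Dict String (PySem.Dict String Int))).items.map (fun p => (p.1, p.2.items))

-- ===== PORT B =====
-- Counter.update(seg): add one vote per instruction, first-seen insertion order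
def pvUpd (c : PySem.Dict String Int) (seg : List String) : PySem.Dict String Int :=
  seg.foldl (fun c inst => c.modify inst 0 (· + 1)) c

def collect_interval_based_votes_alt (all_results : List (List (List String))) (param_combinations : List (Int × Int)) : List (String × List (String × Int)) :=
  let votes : List (PySem.Dict String Int) :=
    (PySem.List.enumerate all_results).foldl (fun votes p =>
      let interval := (PySem.List.pyGetD param_combinations p.1 (0, 0)).1
      let stride := pvStride interval
      (PySem.List.enumerate p.2).foldl (fun votes sp =>
        let seg_start := sp.1 * stride
        let seg_end := seg_start + interval
        -- the while-append growth loop: pad with fresh empty Counters up to length seg_end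
        let votes := votes ++ List.replicate (seg_end.toNat - votes.length) PySem.Dict.empty
        -- votes[f].update(seg); every visited f satisfies 0 ≤ f < len(votes), so .toNat/.getD are exact
        (PySem.List.pyRange seg_start seg_end 1).foldl (fun votes f =>
          votes.set f.toNat (pvUpd (votes.getD f.toNat PySem.Dict.empty) sp.2)) votes) votes) []
  ((PySem.List.enumerate votes).foldl (fun d p =>
      d.insert (PySem.Int.toStr p.1 ++ "->" ++ PySem.Int.toStr (p.1 + 1)) p.2)
    (PySem.Dict.empty : PySem.Dict String (PySem.Dict String Int))).items.map (fun p => (p.1, p.2.items))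

-- ===== PRECONDITION & SPEC =====
-- Pre_ excludes exactly where Python A raises: an index beyond param_combinations (IndexError)
-- or a negative interval among the used pairs (math domain error in sqrt).
def Pre_collect_interval_based_votes (all_results : List (List (List String))) (param_combinations : List (Int × Int)) : Prop :=
  all_results.length ≤ param_combinations.length ∧
  ∀ p ∈ param_combinations.take all_results.length, 0 ≤ p.1
instance (all_results : List (List (List String))) (param_combinations : List (Int × Int)) : Decidable (Pre_collect_interval_based_votes all_results param_combinations) := by unfold Pre_collect_interval_based_votes; infer_instance

def pvWitness_collect_interval_based_votes : List (List (List String)) × (List (Int × Int)) :=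
  ([[["go"], ["stop"]]], [(3, 1)])

def Spec_collect_interval_based_votes (all_results : List (List (List String))) (param_combinations : List (Int × Int)) (out : List (String × List (String × Int))) : Prop := out = collect_interval_based_votes_alt all_results param_combinations
instance (all_results : List (List (List String))) (param_combinations : List (Int × Int)) (out : List (String × List (String × Int))) : Decidable (Spec_collect_interval_based_votes all_results param_combinations out) := by unfold Spec_collect_interval_based_votes; infer_instance

-- ===== CLAIM (what is proved, stated in full; the proofs are below) =====
def Claim_equal_collect_interval_based_votes : Prop := ∀ (all_results : List (List (List String))) (param_combinations : List (Int × Int)), Dom_collect_interval_based_votes all_results param_combinations → Pre_collect_interval_based_votes all_results param_combinations → Spec_collect_interval_based_votes all_results param_combinations (collect_interval_based_votes all_results param_combinations)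

-- ===== LEMMAS AND PROOFS =====

-- a projection that commutes with every step of a foldl commutes with the whole foldl
theorem pv_proj_lift {σ β α : Type} (π : σ → β) (L : List α) (step : σ → α → σ) (u : α → β → β)
    (h : ∀ s x, x ∈ L → π (step s x) = u x (π s)) :
    ∀ s, π (L.foldl step s) = L.foldl (fun c x => u x c) (π s) := by
  induction L with
  | nil => intro s; rfl
  | cons x xs ih =>
    intro s
    simp only [List.foldl_cons]
    rw [ih (fun s y hy => h s y (List.mem_cons_of_mem _ hy)), h s x List.mem_cons_self]

-- B's in-place scatter over range(s,e): entry fn holds g of its old value iff s ≤ fn < e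
theorem pv_scatter (seg : List String) (fn : Nat) :
    ∀ (n : Nat) (s e : Int), (e - s).toNat = n → 0 ≤ s →
    ∀ (v : List (PySem.Dict String Int)), e.toNat ≤ v.length →
    ((PySem.List.pyRange s e 1).foldl (fun v f => v.set f.toNat (pvUpd (v.getD f.toNat PySem.Dict.empty) seg)) v).getD fn PySem.Dict.empty
      = if s ≤ (fn : Int) ∧ (fn : Int) < e then pvUpd (v.getD fn PySem.Dict.empty) seg else v.getD fn PySem.Dict.empty := by
  intro n
  induction n with
  | zero =>
    intro s e he _ v _
    rw [PySem.List.pyRange_one_eq_nil (by omega)]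
    simp only [List.foldl_nil]
    rw [if_neg (by omega)]
  | succ n ih =>
    intro s e he hs v hlen
    have hlt : s < e := by omega
    rw [PySem.List.pyRange_one_cons hlt]
    simp only [List.foldl_cons]
    rw [ih (s + 1) e (by omega) (by omega) _ (by rw [List.length_set]; exact hlen)]
    have hsv : s.toNat < v.length := by omega
    simp only [List.getD_eq_getElem?_getD, List.getElem?_set]
    split_ifs <;> first | omega | simp_all | (simp_all; omega)

-- the growth padding is invisible to getD with the empty-Counter default
theorem pv_getD_pad (v : List (PySem.Dict String Int)) (k fn : Nat) :
    (v ++ List.replicate k PySem.Dict.empty).getD fn PySem.Dict.empty = v.getD fn PySem.Dict.empty := by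
  simp only [List.getD_eq_getElem?_getD, List.getElem?_append, List.getElem?_replicate]
  split_ifs <;> simp_all <;> omega

-- folding set over any index list preserves length
theorem pv_len_foldl_set (seg : List String) (L : List Int) :
    ∀ (v : List (PySem.Dict String Int)),
    (L.foldl (fun v f => v.set f.toNat (pvUpd (v.getD f.toNat PySem.Dict.empty) seg)) v).length = v.length := by
  induction L with
  | nil => intro v; rfl
  | cons x xs ih => intro v; simp only [List.foldl_cons]; rw [ih]; exact List.length_set ..

-- running max of a sequence increasing in the enumerate index is the last term
theorem pv_foldl_max_last (stride interval : Int) (hs : 1 ≤ stride) :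
    ∀ (res : List (List String)) (st : Int) (n : Nat),
    (PySem.List.enumerate res st).foldl (fun n sp => max n ((sp.1 * stride + interval).toNat)) n
      = if res ≠ [] then max n (((st + res.length - 1) * stride + interval).toNat) else n := by
  intro res
  induction res with
  | nil => intro st n; rfl
  | cons x xs ih =>
    intro st n
    rw [PySem.List.enumerate_cons]
    by_cases hxs : xs = []
    · subst hxs
      simp only [List.foldl_cons, PySem.List.enumerate_nil, List.foldl_nil]
      rw [if_pos (by simp)]
      norm_num
    · simp only [List.foldl_cons]
      rw [ih, if_pos hxs, if_pos (by simp)]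
      have he : ((st + 1) + (xs.length : Int) - 1) = st + ((x :: xs).length : Int) - 1 := by
        simp only [List.length_cons]; push_cast; ring
      rw [he]
      have ha : (st * stride + interval).toNat ≤ ((st + ((x :: xs).length : Int) - 1) * stride + interval).toNat := by
        have hmul : st * stride ≤ (st + ((x :: xs).length : Int) - 1) * stride :=
          mul_le_mul_of_nonneg_right (by simp only [List.length_cons]; push_cast; omega) (by omega)
        omega
      omega

-- A's max_frames is nonnegative
theorem pv_mf_nonneg (L : List (Int × List (List String))) (t : Int × List (List String) → Int) :
    ∀ (n : Int), 0 ≤ n → 0 ≤ L.foldl (fun mf p => if p.2 ≠ [] then max mf (t p) else mf) n := by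
  induction L with
  | nil => intro n hn; exact hn
  | cons x xs ih =>
    intro n hn
    simp only [List.foldl_cons]
    apply ih
    split_ifs <;> omega

-- the stride is always positive
theorem pvStride_pos (i : Int) : 0 < pvStride i := by
  unfold pvStride
  exact Int.lt_add_one_iff.mpr (Int.natCast_nonneg _)

-- entry `start` of B's votes list equals A's per-frame vote counter at frame `start`
theorem pv_votes_getD (ar : List (List (List String))) (pcs : List (Int × Int)) (start : Int) (h0 : 0 ≤ start) :
    ((PySem.List.enumerate ar).foldl (fun votes p =>
        (PySem.List.enumerate p.2).foldl (fun votes sp =>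
          (PySem.List.pyRange (sp.1 * pvStride (PySem.List.pyGetD pcs p.1 (0, 0)).1)
              (sp.1 * pvStride (PySem.List.pyGetD pcs p.1 (0, 0)).1 + (PySem.List.pyGetD pcs p.1 (0, 0)).1) 1).foldl
            (fun votes f => votes.set f.toNat (pvUpd (votes.getD f.toNat PySem.Dict.empty) sp.2))
            (votes ++ List.replicate ((sp.1 * pvStride (PySem.List.pyGetD pcs p.1 (0, 0)).1 + (PySem.List.pyGetD pcs p.1 (0, 0)).1).toNat - votes.length) PySem.Dict.empty)) votes) []).getD start.toNat PySem.Dict.empty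
    = (PySem.List.enumerate ar).foldl (fun vc rp =>
        (PySem.List.enumerate rp.2).foldl (fun vc sp =>
          if (sp.1 * pvStride (PySem.List.pyGetD pcs rp.1 (0, 0)).1 ≤ start ∧
                start < sp.1 * pvStride (PySem.List.pyGetD pcs rp.1 (0, 0)).1 + (PySem.List.pyGetD pcs rp.1 (0, 0)).1) ∧
             (sp.1 * pvStride (PySem.List.pyGetD pcs rp.1 (0, 0)).1 < start + 1 ∧
                start + 1 ≤ sp.1 * pvStride (PySem.List.pyGetD pcs rp.1 (0, 0)).1 + (PySem.List.pyGetD pcs rp.1 (0, 0)).1) then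
            sp.2.foldl (fun c inst => c.modify inst 0 (· + 1)) vc
          else vc) vc) PySem.Dict.empty := by
  refine Eq.trans (pv_proj_lift (fun v : List (PySem.Dict String Int) => v.getD start.toNat PySem.Dict.empty) _ _
    (fun (rp : Int × List (List String)) (c : PySem.Dict String Int) =>
      (PySem.List.enumerate rp.2).foldl (fun c sp =>
      if sp.1 * pvStride (PySem.List.pyGetD pcs rp.1 (0, 0)).1 ≤ start ∧
           start < sp.1 * pvStride (PySem.List.pyGetD pcs rp.1 (0, 0)).1 + (PySem.List.pyGetD pcs rp.1 (0, 0)).1 then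
        pvUpd c sp.2 else c) c)
    (fun v rp _ =>
      pv_proj_lift (fun v : List (PySem.Dict String Int) => v.getD start.toNat PySem.Dict.empty) _ _
        (fun (sp : Int × List String) (c : PySem.Dict String Int) =>
          if sp.1 * pvStride (PySem.List.pyGetD pcs rp.1 (0, 0)).1 ≤ start ∧
               start < sp.1 * pvStride (PySem.List.pyGetD pcs rp.1 (0, 0)).1 + (PySem.List.pyGetD pcs rp.1 (0, 0)).1 then
            pvUpd c sp.2 else c)
        (fun (v : List (PySem.Dict String Int)) (sp : Int × List String)
            (hsp : sp ∈ PySem.List.enumerate rp.2) => by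
          have hs1 : (0 : Int) ≤ sp.1 := by
            rw [PySem.List.mem_enumerate_iff] at hsp
            obtain ⟨k, hk, heq⟩ := hsp
            rw [heq]
            simp
          have hs0 : (0 : Int) ≤ sp.1 * pvStride (PySem.List.pyGetD pcs rp.1 (0, 0)).1 :=
            mul_nonneg hs1 (le_of_lt (pvStride_pos _))
          dsimp only
          rw [pv_scatter sp.2 start.toNat _ _ _ rfl hs0 _
            (by rw [List.length_append, List.length_replicate]; omega)]
          rw [pv_getD_pad]
          rw [Int.toNat_of_nonneg h0])
        v)
    []) ?_
  simp only [List.getD_eq_getElem?_getD, List.getElem?_nil, Option.getD_none]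
  exact (PySem.List.foldl_congr_mem _ _ _ _ (fun vc rp _ =>
    PySem.List.foldl_congr_mem _ _ _ _ (fun c sp _ => if_congr (by omega) rfl rfl))).symm

-- B's votes list has exactly max_frames entries
theorem pv_votes_len (ar : List (List (List String))) (pcs : List (Int × Int)) :
    ((PySem.List.enumerate ar).foldl (fun votes p =>
        (PySem.List.enumerate p.2).foldl (fun votes sp =>
          (PySem.List.pyRange (sp.1 * pvStride (PySem.List.pyGetD pcs p.1 (0, 0)).1)
              (sp.1 * pvStride (PySem.List.pyGetD pcs p.1 (0, 0)).1 + (PySem.List.pyGetD pcs p.1 (0, 0)).1) 1).foldl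
            (fun votes f => votes.set f.toNat (pvUpd (votes.getD f.toNat PySem.Dict.empty) sp.2))
            (votes ++ List.replicate ((sp.1 * pvStride (PySem.List.pyGetD pcs p.1 (0, 0)).1 + (PySem.List.pyGetD pcs p.1 (0, 0)).1).toNat - votes.length) PySem.Dict.empty)) votes) []).length
    = ((PySem.List.enumerate ar).foldl (fun mf p =>
        if p.2 ≠ [] then
          max mf (((p.2.length : Int) - 1) * pvStride (PySem.List.pyGetD pcs p.1 (0, 0)).1 + (PySem.List.pyGetD pcs p.1 (0, 0)).1)
        else mf) 0).toNat := by
  rw [pv_proj_lift List.length _ _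
    (fun p n => if p.2 ≠ [] then
        max n ((((p.2.length : Int) - 1) * pvStride (PySem.List.pyGetD pcs p.1 (0, 0)).1 + (PySem.List.pyGetD pcs p.1 (0, 0)).1).toNat)
      else n)
    (fun v p _ => by
      rw [pv_proj_lift List.length _ _
        (fun sp n => max n ((sp.1 * pvStride (PySem.List.pyGetD pcs p.1 (0, 0)).1 + (PySem.List.pyGetD pcs p.1 (0, 0)).1).toNat))
        (fun v sp _ => by
          dsimp only
          rw [pv_len_foldl_set sp.2, List.length_append, List.length_replicate]
          omega)
        v]
      rw [pv_foldl_max_last _ _ (by have := pvStride_pos (PySem.List.pyGetD pcs p.1 (0, 0)).1; omega)]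
      have hz : ((0 : Int) + (p.2.length : Int) - 1) = (p.2.length : Int) - 1 := by ring
      rw [hz])]
  rw [pv_proj_lift Int.toNat _ _
    (fun p n => if p.2 ≠ [] then
        max n ((((p.2.length : Int) - 1) * pvStride (PySem.List.pyGetD pcs p.1 (0, 0)).1 + (PySem.List.pyGetD pcs p.1 (0, 0)).1).toNat)
      else n)
    (fun m p _ => by dsimp only; split_ifs <;> omega)]
  rfl

-- xs[i] read through pyGetD equals getD at i.toNat when 0 ≤ i < len(xs)
theorem pv_pyGetD_getD {α : Type} (xs : List α) (i : Int) (d : α) (h0 : 0 ≤ i)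
    (h1 : i < (xs.length : Int)) : PySem.List.pyGetD xs i d = xs.getD i.toNat d := by
  rw [PySem.List.pyGetD_eq_getElem xs d h0 h1]
  exact List.getElem_eq_getD d

-- the nonempty-case equality of the two result dictionaries
theorem pv_main (ar : List (List (List String))) (pcs : List (Int × Int)) :
    ((PySem.List.pyRange 0
        ((PySem.List.enumerate ar).foldl (fun mf p =>
          if p.2 ≠ [] then
            max mf (((p.2.length : Int) - 1) * pvStride (PySem.List.pyGetD pcs p.1 (0, 0)).1 + (PySem.List.pyGetD pcs p.1 (0, 0)).1)
          else mf) 0) 1).foldl (fun d start =>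
        d.insert (PySem.Int.toStr start ++ "->" ++ PySem.Int.toStr (start + 1))
          ((PySem.List.enumerate ar).foldl (fun vc rp =>
            (PySem.List.enumerate rp.2).foldl (fun vc sp =>
              if (sp.1 * pvStride (PySem.List.pyGetD pcs rp.1 (0, 0)).1 ≤ start ∧
                    start < sp.1 * pvStride (PySem.List.pyGetD pcs rp.1 (0, 0)).1 + (PySem.List.pyGetD pcs rp.1 (0, 0)).1) ∧
                 (sp.1 * pvStride (PySem.List.pyGetD pcs rp.1 (0, 0)).1 < start + 1 ∧
                    start + 1 ≤ sp.1 * pvStride (PySem.List.pyGetD pcs rp.1 (0, 0)).1 + (PySem.List.pyGetD pcs rp.1 (0, 0)).1) then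
                sp.2.foldl (fun c inst => c.modify inst 0 (· + 1)) vc
              else vc) vc) PySem.Dict.empty))
      (PySem.Dict.empty : PySem.Dict String (PySem.Dict String Int)))
    = ((PySem.List.enumerate
        ((PySem.List.enumerate ar).foldl (fun votes p =>
          (PySem.List.enumerate p.2).foldl (fun votes sp =>
            (PySem.List.pyRange (sp.1 * pvStride (PySem.List.pyGetD pcs p.1 (0, 0)).1)
                (sp.1 * pvStride (PySem.List.pyGetD pcs p.1 (0, 0)).1 + (PySem.List.pyGetD pcs p.1 (0, 0)).1) 1).foldl
              (fun votes f => votes.set f.toNat (pvUpd (votes.getD f.toNat PySem.Dict.empty) sp.2))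
              (votes ++ List.replicate ((sp.1 * pvStride (PySem.List.pyGetD pcs p.1 (0, 0)).1 + (PySem.List.pyGetD pcs p.1 (0, 0)).1).toNat - votes.length) PySem.Dict.empty)) votes) [])).foldl
        (fun d p => d.insert (PySem.Int.toStr p.1 ++ "->" ++ PySem.Int.toStr (p.1 + 1)) p.2)
        (PySem.Dict.empty : PySem.Dict String (PySem.Dict String Int))) := by
  have hmf0 : (0 : Int) ≤ (PySem.List.enumerate ar).foldl (fun mf p =>
      if p.2 ≠ [] then
        max mf (((p.2.length : Int) - 1) * pvStride (PySem.List.pyGetD pcs p.1 (0, 0)).1 + (PySem.List.pyGetD pcs p.1 (0, 0)).1)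
      else mf) 0 :=
    pv_mf_nonneg _ _ 0 le_rfl
  rw [PySem.List.enumerate_eq_map_pyRange (d := PySem.Dict.empty), List.foldl_map]
  rw [PySem.List.len_eq, pv_votes_len ar pcs, Int.toNat_of_nonneg hmf0]
  refine PySem.List.foldl_congr_mem _ _ _ _ (fun d s hmem => ?_)
  obtain ⟨h1, h2⟩ := PySem.List.mem_pyRange_one.mp hmem
  dsimp only
  refine congrArg _ ?_
  rw [pv_pyGetD_getD _ s _ h1 (by rw [pv_votes_len ar pcs]; omega)]
  exact (pv_votes_getD ar pcs s h1).symm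

-- ===== VERDICT (by name: the statement is the Claim_ definition above) =====
theorem collect_interval_based_votes_spec : Claim_equal_collect_interval_based_votes := by
  intro ar pcs _ _
  unfold Spec_collect_interval_based_votes
  by_cases h : ar = []
  · subst h; rfl
  · simp only [collect_interval_based_votes, collect_interval_based_votes_alt, if_neg h]
    exact congrArg (fun l : PySem.Dict String (PySem.Dict String Int) => l.items.map fun p => (p.1, p.2.items))
      (pv_main ar pcs)
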